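-- pv_equiv track=rewrite | github.com/meh9184/coding-test-practice | estsoft/test1.py | solution
-- ===== SOURCE A (Python) =====
-- def solution(S):
--     # substring "aaa"의 위치를 저장 시킬 list pos_aaa
--     pos_aaa = []
--
--     # string S에 존재하는 substring "aaa"의 첫 번째 위치 append
--     # 없을 경우 -1 append
--     pos_aaa.append(S.find("aaa",0))
--
--     # string S에 substring "aaa"가 존재 할 경우
--     if pos_aaa[0] != -1:
--         i = 0
--         while True:
--             # string S에 존재하는 n번째 substring "aaa"의 위치 확인
--             idx = S.find("aaa", pos_aaa[i]+1)
--
--             # string S에 존재하는 n번째 substring "aaa"의 위치 append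
--             if idx != -1:
--                 pos_aaa.append(idx)
--             # 마지막 substring의 위치일 경우
--             else:
--                 break
--             i = i+1
--     # string S에 substring "aaa"가 존재 하지 않을 경우
--     else:
--         pos_aaa = []
--
--
--
--     # substring "bbb"의 위치를 저장 시킬 list pos_bbb
--     pos_bbb = []
--
--     # string S에 존재하는 substring "bbb"의 첫 번째 위치 append
--     # 없을 경우 -1 append
--     pos_bbb.append(S.find("bbb",0))
--
--     # string S에 substring "bbb"가 존재 할 경우
--     if pos_bbb[0] != -1:
--         i = 0
--         while True:
--             # string S에 존재하는 n번째 substring "bbb"의 위치 확인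
--             idx = S.find("bbb", pos_bbb[i]+1)
--
--             # string S에 존재하는 n번째 substring "bbb"의 위치 append
--             if idx != -1:
--                 pos_bbb.append(idx)
--             # 마지막 substring의 위치일 경우
--             else:
--                 break
--             i = i+1
--     # string S에 substring "bbb"가 존재 할 경우
--     else:
--         pos_bbb = []
--
--     # "aaa" "bbb" 모든 위치 결합 및 정렬
--     pos = pos_aaa + pos_bbb
--     pos.sort()
--
--     # S에 "aaa" "bbb"가 없을 경우
--     if pos == []:
--         rst = len(S)
--     else:
--         # semi-alternating substring들의 길이를 계산
--         diffs = []
--         # offset: 처음 나오는 "aaa" or "bbb" 까지의 길이 계산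
--         diffs.append(pos[0]+2)
--         for i in range(len(pos)-1):
--             diff = pos[i+1]-pos[i]+1
--             # 바로 인접해 있는 경우 (e.g., "-aaaa-") 예외 처리: diff <= 2
--             if diff > 2:
--                 diffs.append(diff)
--         # longest semi-alternating substring 계산
--         rst = max(diffs)
--
--     return rst
-- ===== SOURCE B (Python) =====
-- def solution(S):
--     # One linear pass instead of A's repeated str.find + sort + gap loop:
--     # whenever the last three characters are an equal run of 'a' or 'b',
--     # close the current segment (it runs from `start` up to the middle of
--     # the run) and restart just inside the run.  With no run at all the
--     # whole string is the answer.
--     best = -1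
--     start = 0
--     for i in range(2, len(S)):
--         if S[i] == S[i - 1] == S[i - 2] and S[i] in ('a', 'b'):
--             best = max(best, i - start)
--             start = i - 1
--     return len(S) if best < 0 else best
-- ===== Notes on version B (the rewrite author's own statement) =====
-- stated objective: simpler
-- what changed: Replaced A's collect-all-'aaa'/'bbb'-positions-via-repeated-str.find, sort, gap-list and max pipeline with a single linear scan that closes a segment each time the last three characters are an equal 'a'/'b' run.
import Mathlib
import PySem

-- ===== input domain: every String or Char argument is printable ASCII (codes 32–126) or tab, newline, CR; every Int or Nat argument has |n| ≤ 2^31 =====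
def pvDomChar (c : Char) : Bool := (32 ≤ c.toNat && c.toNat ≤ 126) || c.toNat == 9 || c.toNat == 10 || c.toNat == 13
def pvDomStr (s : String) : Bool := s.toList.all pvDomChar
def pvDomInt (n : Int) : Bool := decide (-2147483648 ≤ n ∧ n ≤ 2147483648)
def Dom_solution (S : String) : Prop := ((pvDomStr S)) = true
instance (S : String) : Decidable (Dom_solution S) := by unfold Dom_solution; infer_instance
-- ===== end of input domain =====

-- B replaces A's collect-'aaa'/'bbb'-positions-via-repeated-find + sort + gap-list + max pipeline
-- with a single linear scan that closes a segment whenever the last three characters are an equal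
-- 'a'/'b' run (simpler: one pass, no position lists, no sort).


-- ===== PORT A =====
-- A's `while True` loop over S.find(sub, pos[i]+1); fuel l.length+1 is provably sufficient
-- because each found index is strictly larger than the previous start position.
def pvCollect (l sub : List Char) (fuel : Nat) (k : Int) : List Int :=
  match fuel with
  | 0 => []
  | fuel + 1 =>
    let idx := PySem.Chars.findFrom l sub k none
    if idx = -1 then [] else idx :: pvCollect l sub fuel (idx + 1)

def solution (S : String) : Int :=
  let l := S.toList
  let pos_aaa := pvCollect l ['a','a','a'] (l.length + 1) 0
  let pos_bbb := pvCollect l ['b','b','b'] (l.length + 1) 0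
  let pos := PySem.List.sorted (pos_aaa ++ pos_bbb) (fun x => x) false
  if pos = [] then (l.length : Int)
  else
    let diffs :=
      (PySem.List.pyRange 0 ((pos.length : Int) - 1) 1).foldl
        (fun acc i =>
          if PySem.List.pyGetD pos (i + 1) 0 - PySem.List.pyGetD pos i 0 + 1 > 2 then
            acc ++ [PySem.List.pyGetD pos (i + 1) 0 - PySem.List.pyGetD pos i 0 + 1]
          else acc)
        [PySem.List.pyGetD pos 0 0 + 2]
    -- Python's max(diffs); diffs provably contains pos[0]+2, so the getD default is never taken
    (PySem.List.max? diffs (fun x => x)).getD 0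

-- ===== PORT B =====
def solution_alt (S : String) : Int :=
  let l := S.toList
  -- indices i, i-1, i-2 are in range for every i produced by range(2, len), so pyGetD's default is never taken
  let res :=
    (PySem.List.pyRange 2 (l.length : Int) 1).foldl
      (fun (st : Int × Int) i =>
        if PySem.List.pyGetD l i ' ' = PySem.List.pyGetD l (i - 1) ' '
             ∧ PySem.List.pyGetD l (i - 1) ' ' = PySem.List.pyGetD l (i - 2) ' '
             ∧ (PySem.List.pyGetD l i ' ' = 'a' ∨ PySem.List.pyGetD l i ' ' = 'b')
        then (max st.1 (i - st.2), i - 1) else st)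
      (-1, 0)
  if res.1 < 0 then (l.length : Int) else res.1

-- ===== PRECONDITION & SPEC =====
def Spec_solution (S : String) (out : Int) : Prop := out = solution_alt S
instance (S : String) (out : Int) : Decidable (Spec_solution S out) := by unfold Spec_solution; infer_instance

-- ===== CLAIM (what is proved, stated in full; the proofs are below) =====
def Claim_equal_solution : Prop := ∀ (S : String), Dom_solution S → Spec_solution S (solution S)

-- ===== LEMMAS AND PROOFS =====

def pvTrip (l : List Char) (p : Nat) : Bool :=
  decide (['a','a','a'] <+: l.drop p) || decide (['b','b','b'] <+: l.drop p)

def pvPos (l : List Char) : List Nat := (List.range l.length).filter (pvTrip l)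

def pvGaps (ps : List Nat) : List Int :=
  (ps.zip ps.tail).map (fun pq => (pq.2 : Int) - (pq.1 : Int) + 1)


-- the increasing list of match positions of sub in l at positions ≥ k-- the increasing list of match positions of sub in l at positions ≥ k
def pvOccs (l sub : List Char) (k : Nat) : List Nat :=
  (List.range l.length).filter (fun p => k ≤ p && decide (sub <+: l.drop p))

lemma pv_filter_range_tail (P : Nat → Bool) (m L : Nat) (hm : m ≤ L)
    (h : ∀ p, m ≤ p → P p = false) :
    (List.range L).filter P = (List.range m).filter P := by
  have : L = m + (L - m) := by omega
  rw [this, List.range_add, List.filter_append]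
  have h2 : ((List.range (L - m)).map (m + ·)).filter P = [] := by
    rw [List.filter_eq_nil_iff]
    intro a ha
    simp only [List.mem_map] at ha
    obtain ⟨k, -, rfl⟩ := ha
    simp [h (m + k) (by omega)]
  rw [h2, List.append_nil]

lemma pv_occs_nil (l sub : List Char) (k : Nat)
    (h : ∀ p, k ≤ p → ¬ sub <+: l.drop p) : pvOccs l sub k = [] := by
  unfold pvOccs
  rw [List.filter_eq_nil_iff]
  intro p hp
  by_cases hk : k ≤ p
  · simp [h p hk]
  · simp [hk]

lemma pv_occs_cons (l sub : List Char) (k m : Nat) (hm : m < l.length)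
    (hP : sub <+: l.drop m) (hk : k ≤ m)
    (hmin : ∀ i, k ≤ i → i < m → ¬ sub <+: l.drop i) :
    pvOccs l sub k = m :: pvOccs l sub (m + 1) := by
  unfold pvOccs
  have hsplit : l.length = (m+1) + (l.length - (m+1)) := by omega
  rw [hsplit, List.range_add, List.filter_append, List.filter_append]
  have e1 : (List.range (m+1)).filter (fun p => k ≤ p && decide (sub <+: l.drop p)) = [m] := by
    rw [List.range_succ, List.filter_append]
    have : (List.range m).filter (fun p => k ≤ p && decide (sub <+: l.drop p)) = [] := by
      rw [List.filter_eq_nil_iff]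
      intro p hp
      simp only [List.mem_range] at hp
      by_cases hkp : k ≤ p
      · simp [hmin p hkp hp]
      · simp [hkp]
    rw [this]
    simp [hk, hP]
  have e2 : (List.range (m+1)).filter (fun p => m+1 ≤ p && decide (sub <+: l.drop p)) = [] := by
    rw [List.filter_eq_nil_iff]
    intro p hp
    simp only [List.mem_range] at hp
    have : ¬ (m+1 ≤ p) := by omega
    simp [this]
  have e3 : ((List.range (l.length - (m+1))).map ((m+1) + ·)).filter
        (fun p => k ≤ p && decide (sub <+: l.drop p))
      = ((List.range (l.length - (m+1))).map ((m+1) + ·)).filter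
        (fun p => m+1 ≤ p && decide (sub <+: l.drop p)) := by
    apply List.filter_congr
    intro x hx
    simp only [List.mem_map] at hx
    obtain ⟨q, -, rfl⟩ := hx
    have h1 : k ≤ m+1+q := by omega
    have h2 : m+1 ≤ m+1+q := by omega
    simp [h1, h2]
  conv_lhs => rw [e1, e3]
  rw [e2]
  rfl

lemma pv_collect_spec (l sub : List Char) (hs : sub ≠ []) :
    ∀ (fuel : Nat) (k : Nat), k ≤ l.length → l.length - k < fuel →
      pvCollect l sub fuel (k : Int) = (pvOccs l sub k).map (Nat.cast) := by
  intro fuel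
  induction fuel with
  | zero => intro k hk hf; omega
  | succ fuel ih =>
    intro k hk hf
    unfold pvCollect
    by_cases h0 : PySem.Chars.findFrom l sub (k : Int) none = -1
    · simp only [h0, if_pos rfl]
      have hno : ∀ p, k ≤ p → ¬ sub <+: l.drop p := by
        intro p hp hpre
        have hinf : sub <:+: l.drop k := by
          have hsfx : (l.drop k).drop (p - k) <:+ l.drop k := List.drop_suffix _ _
          have : l.drop p = (l.drop k).drop (p - k) := by
            rw [List.drop_drop]; congr 1; omega
          rw [this] at hpre
          exact hpre.isInfix.trans hsfx.isInfix
        rw [PySem.Chars.findFrom_natCast_eq_neg_one_iff l sub k hk] at h0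
        exact h0 hinf
      rw [pv_occs_nil l sub k hno]
      rfl
    · obtain ⟨hge, hpre, hmin⟩ := PySem.Chars.findFrom_natCast_spec l sub k hk h0
      set idx := PySem.Chars.findFrom l sub (k : Int) none with hidx
      have hm : idx.toNat < l.length := by
        have h1 : sub.length ≤ (l.drop idx.toNat).length := hpre.length_le
        have h2 : 0 < sub.length := List.length_pos_iff.mpr hs
        simp only [List.length_drop] at h1
        omega
      have hcast : idx = ((idx.toNat : Nat) : Int) := by omega
      rw [pv_occs_cons l sub k idx.toNat hm hpre (by omega) hmin]
      simp only [if_neg h0, List.map_cons]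
      have : idx + 1 = ((idx.toNat + 1 : Nat) : Int) := by omega
      rw [this, ih (idx.toNat + 1) (by omega) (by omega)]
      conv_rhs => rw [← hcast]

lemma pv_filter_or_perm {α : Type} (A B : α → Bool) (xs : List α)
    (hd : ∀ x, ¬(A x = true ∧ B x = true)) :
    ((xs.filter A) ++ (xs.filter B)).Perm (xs.filter (fun x => A x || B x)) := by
  induction xs with
  | nil => simp
  | cons x xs ih =>
    by_cases hA : A x = true
    · have hB : B x = false := by
        rcases Bool.eq_false_or_eq_true (B x) with h | h
        · exact absurd ⟨hA, h⟩ (hd x)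
        · exact h
      simp only [List.filter_cons, hA, hB, Bool.or_true, Bool.true_or, if_true]
      simpa using ih.cons x
    · have hA' : A x = false := by simpa using hA
      by_cases hB : B x = true
      · simp only [List.filter_cons, hA', hB, Bool.false_or, cond_false, cond_true]
        refine List.Perm.trans (List.perm_middle) ?_
        exact (ih.cons x)
      · have hB' : B x = false := by simpa using hB
        simp only [List.filter_cons, hA', hB', Bool.false_or, cond_false]
        exact ih

lemma pv_sorted_merge (l : List Char) :
    PySem.List.sorted
        ((pvOccs l ['a','a','a'] 0).map (Nat.cast) ++ (pvOccs l ['b','b','b'] 0).map (Nat.cast))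
        (fun x => x) false
      = (pvPos l).map (Nat.cast : Nat → Int) := by
  apply PySem.List.sorted_eq_of_perm_of_pairwise_lt
  · -- perm
    rw [← List.map_append]
    apply List.Perm.map
    have eA : pvOccs l ['a','a','a'] 0
        = (List.range l.length).filter (fun p => decide (['a','a','a'] <+: l.drop p)) := by
      apply List.filter_congr; intro p _; simp
    have eB : pvOccs l ['b','b','b'] 0
        = (List.range l.length).filter (fun p => decide (['b','b','b'] <+: l.drop p)) := by
      apply List.filter_congr; intro p _; simp
    have hd : ∀ p, ¬((fun p => decide (['a','a','a'] <+: l.drop p)) p = true ∧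
        (fun p => decide (['b','b','b'] <+: l.drop p)) p = true) := by
      intro p ⟨h1, h2⟩
      simp only [decide_eq_true_eq] at h1 h2
      obtain ⟨t1, e1⟩ := h1
      obtain ⟨t2, e2⟩ := h2
      rw [← e2] at e1
      simp at e1
    rw [eA, eB]
    exact (pv_filter_or_perm _ _ (List.range l.length) hd).symm
  · -- pairwise
    apply List.Pairwise.map
    · exact fun a b h => by exact_mod_cast h
    · exact (List.pairwise_lt_range).filter _

lemma pv_foldl_max_filter (a : Int) (xs : List Int) (h : ∀ x ∈ xs, ¬ 2 < x → x ≤ a) :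
    (xs.filter (fun x => decide (2 < x))).foldl max a = xs.foldl max a := by
  induction xs generalizing a with
  | nil => rfl
  | cons x xs ih =>
    by_cases hx : 2 < x
    · simp only [List.filter_cons, hx, decide_true, cond_true, List.foldl_cons]
      exact ih (max a x) (fun y hy hny => le_trans (h y (by simp [hy]) hny) (le_max_left a x))
    · have hxa : x ≤ a := h x (by simp) hx
      simp only [List.filter_cons, hx, decide_false, cond_false, List.foldl_cons]
      rw [max_eq_left hxa] at *
      exact ih a (fun y hy hny => h y (by simp [hy]) hny)

lemma pv_gaps_map (ps : List Nat) (hne : ps ≠ []) :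
    (PySem.List.pyRange 0 (((ps.map (Nat.cast : Nat → Int)).length : Int) - 1) 1).map
        (fun i => PySem.List.pyGetD (ps.map (Nat.cast : Nat → Int)) (i + 1) 0 -
                  PySem.List.pyGetD (ps.map (Nat.cast : Nat → Int)) i 0 + 1)
      = pvGaps ps := by
  have hn : 1 ≤ ps.length := List.length_pos_iff.mpr hne
  apply List.ext_getElem
  · simp [pvGaps, PySem.List.length_pyRange_one]
  · intro k h1 h2
    rw [List.getElem_map]
    rw [PySem.List.getElem_pyRange_one]
    have hk : k < ps.length - 1 := by
      simp [PySem.List.length_pyRange_one] at h1; omega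
    have e1 : PySem.List.pyGetD (ps.map (Nat.cast : Nat → Int)) (0 + (k:Int) + 1) 0
        = (ps[k+1]'(by omega) : Int) := by
      rw [PySem.List.pyGetD_eq_getElem _ _ (by omega) (by simp; omega)]
      have : ((0 + (k:Int) + 1)).toNat = k + 1 := by omega
      rw [List.getElem_map]
      simp [this]
    have e2 : PySem.List.pyGetD (ps.map (Nat.cast : Nat → Int)) (0 + (k:Int)) 0
        = (ps[k]'(by omega) : Int) := by
      rw [PySem.List.pyGetD_eq_getElem _ _ (by omega) (by simp; omega)]
      have : ((0 + (k:Int))).toNat = k := by omega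
      rw [List.getElem_map]
      simp [this]
    rw [e1, e2]
    simp only [pvGaps, List.getElem_map, List.getElem_zip, List.getElem_tail]

set_option maxHeartbeats 1000000 in
lemma pv_solution_eq (S : String) :
    solution S =
      if pvPos S.toList = [] then (S.toList.length : Int)
      else (pvGaps (pvPos S.toList)).foldl max (((pvPos S.toList).headI : Int) + 2) := by
  unfold solution
  dsimp only
  have hA := pv_collect_spec S.toList ['a','a','a'] (by simp) (S.toList.length + 1) 0
    (by omega) (by omega)
  have hB := pv_collect_spec S.toList ['b','b','b'] (by simp) (S.toList.length + 1) 0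
    (by omega) (by omega)
  simp only [Nat.cast_zero] at hA hB
  rw [hA, hB, pv_sorted_merge]
  by_cases hnil : pvPos S.toList = []
  · simp [hnil]
  · have hmapne : (pvPos S.toList).map (Nat.cast : Nat → Int) ≠ [] := by
      simpa using hnil
    rw [if_neg hmapne, if_neg hnil]
    -- the diffs fold is append-if over the range
    set pos := (pvPos S.toList).map (Nat.cast : Nat → Int) with hpos
    rw [PySem.List.foldl_congr_mem _ _
      (fun acc i =>
        if (decide (2 < PySem.List.pyGetD pos (i + 1) 0 - PySem.List.pyGetD pos i 0 + 1)) = true then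
          acc ++ [PySem.List.pyGetD pos (i + 1) 0 - PySem.List.pyGetD pos i 0 + 1]
        else acc) _
      (by
        intro acc x _
        by_cases h : 2 < PySem.List.pyGetD pos (x + 1) 0 - PySem.List.pyGetD pos x 0 + 1
        · simp [h]
        · simp [h])]
    rw [PySem.List.foldl_append_if
      (fun i => decide (2 < PySem.List.pyGetD pos (i + 1) 0 - PySem.List.pyGetD pos i 0 + 1))
      (fun i => PySem.List.pyGetD pos (i + 1) 0 - PySem.List.pyGetD pos i 0 + 1)]
    rw [show ((PySem.List.pyRange 0 ((pos.length : Int) - 1) 1).filter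
          (fun i => decide (2 < PySem.List.pyGetD pos (i + 1) 0 - PySem.List.pyGetD pos i 0 + 1))).map
          (fun i => PySem.List.pyGetD pos (i + 1) 0 - PySem.List.pyGetD pos i 0 + 1)
        = ((PySem.List.pyRange 0 ((pos.length : Int) - 1) 1).map
            (fun i => PySem.List.pyGetD pos (i + 1) 0 - PySem.List.pyGetD pos i 0 + 1)).filter
            (fun x => decide (2 < x)) from
        (List.filter_map
          (f := fun i => PySem.List.pyGetD pos (i + 1) 0 - PySem.List.pyGetD pos i 0 + 1)
          (p := fun x => decide (2 < x))
          (l := PySem.List.pyRange 0 ((pos.length : Int) - 1) 1)).symm]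
    rw [hpos, pv_gaps_map (pvPos S.toList) hnil]
    obtain ⟨p, t, hpt⟩ := List.exists_cons_of_ne_nil hnil
    rw [hpt]
    simp only [List.map_cons, PySem.List.pyGetD_zero_cons, List.singleton_append, List.headI]
    rw [PySem.List.max?_id_cons, Option.getD_some]
    apply pv_foldl_max_filter
    intro x _ hx
    have : (0:Int) ≤ (p : Int) := by positivity
    omega

lemma pv_prefix3 (l : List Char) (c : Char) (p : Nat) :
    (([c,c,c] : List Char) <+: l.drop p) ↔
      ∃ h : p + 2 < l.length, l[p]'(by omega) = c ∧ l[p+1]'(by omega) = c ∧ l[p+2]'(by omega) = c := by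
  constructor
  · intro hpre
    have hlen : 3 ≤ (l.drop p).length := by
      have := hpre.length_le; simpa using this
    have hp2 : p + 2 < l.length := by simp at hlen; omega
    have e : l.drop p = l[p]'(by omega) :: l[p+1]'(by omega) :: l[p+2]'(by omega) :: l.drop (p+3) := by
      rw [List.drop_eq_getElem_cons (by omega : p < l.length)]
      congr 1
      rw [List.drop_eq_getElem_cons (by omega : p+1 < l.length)]
      congr 1
      rw [List.drop_eq_getElem_cons (by omega : p+2 < l.length)]
    rw [e] at hpre
    obtain ⟨t, ht⟩ := hpre
    simp only [List.cons_append, List.nil_append, List.cons.injEq] at ht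
    exact ⟨hp2, ht.1.symm, ht.2.1.symm, ht.2.2.1.symm⟩
  · rintro ⟨h, h0, h1, h2⟩
    have e : l.drop p = l[p]'(by omega) :: l[p+1]'(by omega) :: l[p+2]'(by omega) :: l.drop (p+3) := by
      rw [List.drop_eq_getElem_cons (by omega : p < l.length)]
      congr 1
      rw [List.drop_eq_getElem_cons (by omega : p+1 < l.length)]
      congr 1
      rw [List.drop_eq_getElem_cons (by omega : p+2 < l.length)]
    rw [e, h0, h1, h2]
    exact ⟨l.drop (p+3), rfl⟩

lemma pv_trip_lt (l : List Char) (p : Nat) (h : pvTrip l p = true) : p + 2 < l.length := by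
  unfold pvTrip at h
  rcases Bool.or_eq_true_iff.mp h with h' | h' <;>
    · rw [decide_eq_true_eq, pv_prefix3] at h'
      exact h'.1

lemma pv_trip_char (l : List Char) (i : Nat) (h2 : 2 ≤ i) (hi : i < l.length) :
    pvTrip l (i-2) = true ↔
      (l[i]'hi = l[i-1]'(by omega) ∧ l[i-1]'(by omega) = l[i-2]'(by omega) ∧
        (l[i]'hi = 'a' ∨ l[i]'hi = 'b')) := by
  unfold pvTrip
  rw [Bool.or_eq_true_iff, decide_eq_true_eq, decide_eq_true_eq, pv_prefix3, pv_prefix3]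
  have e1 : i - 2 + 1 = i - 1 := by omega
  have e2 : i - 2 + 2 = i := by omega
  constructor
  · rintro (⟨h, ha, hb, hc⟩ | ⟨h, ha, hb, hc⟩) <;>
      · simp only [e1, e2] at ha hb hc
        refine ⟨?_, ?_, ?_⟩ <;> simp_all
  · rintro ⟨ha, hb, hc⟩
    have g1 : l[i-1]'(by omega) = l[i]'hi := ha.symm
    have g2 : l[i-2]'(by omega) = l[i]'hi := by rw [← hb]; exact g1
    rcases hc with hc | hc
    · left
      refine ⟨by omega, ?_⟩
      simp only [e1, e2]
      exact ⟨by rw [g2, hc], by rw [g1, hc], hc⟩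
    · right
      refine ⟨by omega, ?_⟩
      simp only [e1, e2]
      exact ⟨by rw [g2, hc], by rw [g1, hc], hc⟩

lemma pv_gaps_concat (ps : List Nat) (q : Nat) (h : ps ≠ []) :
    pvGaps (ps ++ [q]) = pvGaps ps ++ [(q : Int) - (ps.getLastD 0 : Int) + 1] := by
  induction ps with
  | nil => exact absurd rfl h
  | cons x t ih =>
    cases t with
    | nil => simp [pvGaps]
    | cons y t' =>
      have e : pvGaps (x :: y :: t' ++ [q]) = ((y:Int) - (x:Int) + 1) :: pvGaps (y :: t' ++ [q]) := rfl
      have e2 : pvGaps (x :: y :: t') = ((y:Int) - (x:Int) + 1) :: pvGaps (y :: t') := rfl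
      rw [e, ih (by simp), e2]
      simp

def pvAval (ps : List Nat) : Int :=
  match ps with
  | [] => -1
  | p :: _ => (pvGaps ps).foldl max ((p : Int) + 2)

def pvSt (ps : List Nat) : Int :=
  match ps.getLast? with
  | some p => (p : Int) + 1
  | none => 0

lemma pv_st_cons (p : Nat) (t : List Nat) :
    pvSt (p :: t) = ((p :: t).getLastD 0 : Int) + 1 := by
  unfold pvSt
  rw [List.getLastD_eq_getLast?, List.getLast?_eq_some_getLast (l := p :: t) (by simp)]
  rfl

lemma pv_st_concat (ps : List Nat) (q : Nat) : pvSt (ps ++ [q]) = (q : Int) + 1 := by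
  unfold pvSt
  rw [List.getLast?_concat]

lemma pv_aval_concat (ps : List Nat) (q : Nat) :
    pvAval (ps ++ [q]) = max (pvAval ps) ((q : Int) + 2 - pvSt ps) := by
  cases ps with
  | nil =>
    show (pvGaps [q]).foldl max ((q : Int) + 2) = max (-1) ((q : Int) + 2 - pvSt [])
    have h0 : pvSt [] = 0 := rfl
    have h1 : pvGaps [q] = [] := rfl
    rw [h0, h1]
    simp only [List.foldl_nil]
    omega
  | cons p t =>
    show (pvGaps ((p :: t) ++ [q])).foldl max ((p : Int) + 2)
        = max ((pvGaps (p :: t)).foldl max ((p : Int) + 2)) ((q : Int) + 2 - pvSt (p :: t))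
    rw [pv_gaps_concat (p :: t) q (by simp), pv_st_cons, List.foldl_append]
    simp only [List.foldl_cons, List.foldl_nil]
    omega

lemma pv_inv (l : List Char) :
    ∀ j, j + 2 ≤ l.length →
      (List.range j).foldl
        (fun (st : Int × Int) (k : Nat) =>
          let i := (2 : Int) + (k : Int)
          if PySem.List.pyGetD l i ' ' = PySem.List.pyGetD l (i - 1) ' '
               ∧ PySem.List.pyGetD l (i - 1) ' ' = PySem.List.pyGetD l (i - 2) ' '
               ∧ (PySem.List.pyGetD l i ' ' = 'a' ∨ PySem.List.pyGetD l i ' ' = 'b')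
          then (max st.1 (i - st.2), i - 1) else st)
        (-1, 0)
      = (pvAval ((List.range j).filter (pvTrip l)), pvSt ((List.range j).filter (pvTrip l))) := by
  intro j
  induction j with
  | zero => intro _; rfl
  | succ j ih =>
    intro hle
    rw [List.range_succ, List.foldl_append, ih (by omega), List.foldl_cons, List.foldl_nil]
    dsimp only
    have hiL : j + 2 < l.length := by omega
    have e0 : PySem.List.pyGetD l ((2 : Int) + (j : Int)) ' ' = l[j+2]'hiL := by
      rw [PySem.List.pyGetD_eq_getElem l ' ' (by omega) (by omega)]
      congr 1
      omega
    have e1 : PySem.List.pyGetD l ((2 : Int) + (j : Int) - 1) ' ' = l[j+1]'(by omega) := by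
      rw [PySem.List.pyGetD_eq_getElem l ' ' (by omega) (by omega)]
      congr 1
      omega
    have e2 : PySem.List.pyGetD l ((2 : Int) + (j : Int) - 2) ' ' = l[j]'(by omega) := by
      rw [PySem.List.pyGetD_eq_getElem l ' ' (by omega) (by omega)]
      congr 1
      omega
    have hchar := pv_trip_char l (j+2) (by omega) hiL
    simp only [show j + 2 - 1 = j + 1 from rfl, show j + 2 - 2 = j from rfl] at hchar
    rw [List.filter_append, List.filter_cons, List.filter_nil]
    by_cases ht : pvTrip l j = true
    · have hcond : PySem.List.pyGetD l ((2:Int) + (j:Int)) ' ' = PySem.List.pyGetD l ((2:Int) + (j:Int) - 1) ' '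
           ∧ PySem.List.pyGetD l ((2:Int) + (j:Int) - 1) ' ' = PySem.List.pyGetD l ((2:Int) + (j:Int) - 2) ' '
           ∧ (PySem.List.pyGetD l ((2:Int) + (j:Int)) ' ' = 'a' ∨ PySem.List.pyGetD l ((2:Int) + (j:Int)) ' ' = 'b') := by
        rw [e0, e1, e2]
        exact hchar.mp ht
      rw [if_pos hcond, ht]
      simp only [if_true, List.append_nil]
      rw [pv_aval_concat, pv_st_concat]
      simp only [Prod.mk.injEq]
      exact ⟨by omega, by omega⟩
    · have hcond : ¬(PySem.List.pyGetD l ((2:Int) + (j:Int)) ' ' = PySem.List.pyGetD l ((2:Int) + (j:Int) - 1) ' '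
           ∧ PySem.List.pyGetD l ((2:Int) + (j:Int) - 1) ' ' = PySem.List.pyGetD l ((2:Int) + (j:Int) - 2) ' '
           ∧ (PySem.List.pyGetD l ((2:Int) + (j:Int)) ' ' = 'a' ∨ PySem.List.pyGetD l ((2:Int) + (j:Int)) ' ' = 'b')) := by
        rw [e0, e1, e2]
        intro hc
        exact ht (hchar.mpr hc)
      rw [if_neg hcond]
      simp only [ht, if_false, List.append_nil]
      simp [Bool.false_eq_true]

lemma pv_pos_eq_range (l : List Char) :
    pvPos l = (List.range (l.length - 2)).filter (pvTrip l) := by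
  unfold pvPos
  exact pv_filter_range_tail (pvTrip l) (l.length - 2) l.length (by omega)
    (fun p hp => by
      rcases Bool.eq_false_or_eq_true (pvTrip l p) with h | h
      · have := pv_trip_lt l p h; omega
      · exact h)

lemma pv_aval_nonneg_of_ne_nil (ps : List Nat) (h : ps ≠ []) : 0 ≤ pvAval ps := by
  obtain ⟨p, t, rfl⟩ := List.exists_cons_of_ne_nil h
  show (0:Int) ≤ (pvGaps (p :: t)).foldl max ((p : Int) + 2)
  have := (PySem.List.le_foldl_max (pvGaps (p :: t)) ((p : Int) + 2)).1
  omega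

lemma pv_alt_eq (S : String) :
    solution_alt S =
      if pvPos S.toList = [] then (S.toList.length : Int)
      else (pvGaps (pvPos S.toList)).foldl max (((pvPos S.toList).headI : Int) + 2) := by
  unfold solution_alt
  dsimp only
  rw [PySem.List.pyRange_one, List.foldl_map]
  have hnn : ((S.toList.length : Int) - 2).toNat = S.toList.length - 2 := by omega
  rw [hnn]
  by_cases hL : S.toList.length < 2
  · have h2 : S.toList.length - 2 = 0 := by omega
    rw [h2]
    have hpos : pvPos S.toList = [] := by
      rw [pv_pos_eq_range, h2]
      rfl
    rw [hpos, if_pos rfl]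
    rfl
  · rw [pv_inv S.toList (S.toList.length - 2) (by omega), ← pv_pos_eq_range]
    by_cases hnil : pvPos S.toList = []
    · rw [hnil, if_pos rfl]
      rfl
    · rw [if_neg hnil]
      have hnn2 := pv_aval_nonneg_of_ne_nil _ hnil
      rw [if_neg (by omega)]
      obtain ⟨p, t, hpt⟩ := List.exists_cons_of_ne_nil hnil
      rw [hpt]
      rfl

-- ===== VERDICT (by name: the statement is the Claim_ definition above) =====
theorem solution_spec : Claim_equal_solution := by
  intro S _
  show solution S = solution_alt S
  rw [pv_solution_eq, pv_alt_eq]
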